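-- pv_equiv track=rewrite | github.com/abhishekgoyal-a11y/DevShelfs | web/utils.py | group_ai_by_category
-- ===== SOURCE A (Python) =====
-- def group_ai_by_category(
--     items: list[dict],
--     category_order: tuple[str, ...] = ("Marketing & ads", "Image & design", "Video & motion"),
-- ) -> list[tuple[str, list[dict]]]:
--     m: dict[str, list[dict]] = {}
--     for item in items:
--         cat = (item.get("category") or "").strip() or "Other"
--         m.setdefault(cat, []).append(item)
--     out: list[tuple[str, list[dict]]] = []
--     for name in category_order:
--         if name in m:
--             out.append((name, m.pop(name)))
--     for name, lst in sorted(m.items()):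
--         out.append((name, lst))
--     return out
-- ===== SOURCE B (Python) =====
-- def group_ai_by_category(
--     items: list[dict],
--     category_order: tuple[str, ...] = ("Marketing & ads", "Image & design", "Video & motion"),
-- ) -> list[tuple[str, list[dict]]]:
--     def cat(item):
--         return (item.get("category") or "").strip() or "Other"
--     names = list(dict.fromkeys(cat(item) for item in items))
--     ranked = sorted((n for n in names if n in category_order), key=category_order.index)
--     rest = sorted(n for n in names if n not in category_order)
--     return [(n, [item for item in items if cat(item) == n]) for n in ranked + rest]
-- ===== Notes on version B (the rewrite author's own statement) =====
-- stated objective: simpler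
-- what changed: B replaces A's dict-of-lists with an ordered pop loop and a separate alphabetical sort by computing the distinct category names once, ordering them with two keyed sorted() calls (category_order.index, then alphabetical), and emitting each group with a per-name filter over items.
import Mathlib
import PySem

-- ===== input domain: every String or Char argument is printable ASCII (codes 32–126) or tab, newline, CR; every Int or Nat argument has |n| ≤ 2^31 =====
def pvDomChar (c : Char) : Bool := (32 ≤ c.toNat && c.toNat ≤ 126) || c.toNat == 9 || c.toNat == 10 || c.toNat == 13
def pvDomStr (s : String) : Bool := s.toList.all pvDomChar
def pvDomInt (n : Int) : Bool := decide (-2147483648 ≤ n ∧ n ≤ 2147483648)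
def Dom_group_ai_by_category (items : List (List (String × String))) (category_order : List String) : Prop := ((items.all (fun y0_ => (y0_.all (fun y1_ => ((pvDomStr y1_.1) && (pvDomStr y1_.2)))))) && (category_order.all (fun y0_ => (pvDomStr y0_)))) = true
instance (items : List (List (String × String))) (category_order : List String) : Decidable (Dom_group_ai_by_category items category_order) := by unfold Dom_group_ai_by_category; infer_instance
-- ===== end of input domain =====

-- B groups by building the distinct category names once and producing the output with two keyed
-- sorts plus a per-name filter, instead of A's dict-of-lists with an ordered pop loop (simpler decomposition).

-- shared helper: (item.get("category") or "").strip() or "Other"  (both Pythons contain this expression verbatim)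
def pvCat (item : List (String × String)) : String :=
  let s := ((PySem.Dict.mk item).get? "category").getD ""
  let t := PySem.Str.strip s
  if t = "" then "Other" else t

-- ===== PORT A =====
def group_ai_by_category (items : List (List (String × String))) (category_order : List String) : List (String × (List (List (String × String)))) :=
  -- m.setdefault(cat, []).append(item)  ≡  m[cat] = m.get(cat, []) + [item]  — Dict.modify (exact)
  let m := items.foldl (fun d item => d.modify (pvCat item) [] (fun v => v ++ [item])) PySem.Dict.empty
  -- for name in category_order: if name in m: out.append((name, m.pop(name)))   (pop = lookup + erase)
  let st := category_order.foldl
      (fun (acc : List (String × (List (List (String × String)))) × PySem.Dict String (List (List (String × String)))) name =>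
        if acc.2.contains name then (acc.1 ++ [(name, acc.2.getD name [])], acc.2.erase name) else acc)
      ([], m)
  -- sorted(m.items()): the remaining keys are distinct, so Python's tuple comparison never reaches
  -- the second components and equals sorting by the key (exact here)
  st.1 ++ PySem.List.sorted st.2.items (fun p => p.1) false

-- ===== PORT B =====
def group_ai_by_category_alt (items : List (List (String × String))) (category_order : List String) : List (String × (List (List (String × String)))) :=
  let names := PySem.List.dedup (items.map pvCat)
  -- sorted((n for n in names if n in category_order), key=category_order.index); the key is only
  -- applied to members of category_order, so .index never raises (the getD default is unreachable)
  let ranked := PySem.List.sorted (names.filter (fun n => category_order.contains n))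
      (fun n => (PySem.List.index? category_order n).getD 0) false
  let rest := PySem.List.sorted (names.filter (fun n => !(category_order.contains n))) (fun n => n) false
  (ranked ++ rest).map (fun n => (n, items.filter (fun item => pvCat item == n)))

-- ===== PRECONDITION & SPEC =====
def Spec_group_ai_by_category (items : List (List (String × String))) (category_order : List String) (out : List (String × (List (List (String × String))))) : Prop := out = group_ai_by_category_alt items category_order
instance (items : List (List (String × String))) (category_order : List String) (out : List (String × (List (List (String × String))))) : Decidable (Spec_group_ai_by_category items category_order out) := by unfold Spec_group_ai_by_category; infer_instance

-- ===== CLAIM (what is proved, stated in full; the proofs are below) =====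
def Claim_equal_group_ai_by_category : Prop := ∀ (items : List (List (String × String))) (category_order : List String), Dom_group_ai_by_category items category_order → Spec_group_ai_by_category items category_order (group_ai_by_category items category_order)

-- ===== LEMMAS AND PROOFS =====

-- the names popped by A's ordered loop: order-names present in ks, each at its first occurrence
def pvPick (order ks : List String) : List String :=
  match order with
  | [] => []
  | n :: rest => if n ∈ ks then n :: pvPick rest (ks.erase n) else pvPick rest ks

theorem pv_mem_pick {x : String} (order : List String) (ks : List String) (hnd : ks.Nodup) :
    x ∈ pvPick order ks ↔ x ∈ ks ∧ x ∈ order := by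
  induction order generalizing ks with
  | nil => simp [pvPick]
  | cons n rest ih =>
    by_cases hn : n ∈ ks
    · simp only [pvPick, if_pos hn, List.mem_cons, ih _ (hnd.erase n), hnd.mem_erase_iff]
      constructor
      · rintro (rfl | ⟨⟨hne, hks⟩, hr⟩)
        · exact ⟨hn, Or.inl rfl⟩
        · exact ⟨hks, Or.inr hr⟩
      · rintro ⟨hks, rfl | hr⟩
        · exact Or.inl rfl
        · by_cases hx : x = n
          · exact Or.inl hx
          · exact Or.inr ⟨⟨hx, hks⟩, hr⟩
    · simp only [pvPick, if_neg hn, ih _ hnd, List.mem_cons]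
      constructor
      · rintro ⟨hks, hr⟩; exact ⟨hks, Or.inr hr⟩
      · rintro ⟨hks, rfl | hr⟩
        · exact absurd hks hn
        · exact ⟨hks, hr⟩

theorem pv_nodup_pick (order ks : List String) (hnd : ks.Nodup) : (pvPick order ks).Nodup := by
  induction order generalizing ks with
  | nil => simp [pvPick]
  | cons n rest ih =>
    by_cases hn : n ∈ ks
    · simp only [pvPick, if_pos hn, List.nodup_cons]
      refine ⟨fun hmem => ?_, ih _ (hnd.erase n)⟩
      have := ((pv_mem_pick rest (ks.erase n) (hnd.erase n)).mp hmem).1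
      exact (hnd.mem_erase_iff.mp this).1 rfl
    · simpa [pvPick, if_neg hn] using ih _ hnd

theorem pv_pick_pairwise (order ks : List String) (hnd : ks.Nodup) :
    (pvPick order ks).Pairwise
      (fun a b => (PySem.List.index? order a).getD 0 < (PySem.List.index? order b).getD 0) := by
  induction order generalizing ks with
  | nil => simp [pvPick]
  | cons n rest ih =>
    have shift : ∀ y ∈ ks, y ≠ n → y ∈ rest →
        (PySem.List.index? (n :: rest) y).getD 0 = (PySem.List.index? rest y).getD 0 + 1 := by
      intro y _ hy hyr
      rw [PySem.List.index?_cons_of_ne rest (Ne.symm hy)]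
      obtain ⟨k, hk⟩ := Option.isSome_iff_exists.mp ((PySem.List.index?_isSome_iff rest y).mpr hyr)
      rw [PySem.List.index?_eq_idxOf?] at hk
      simp [hk]
    by_cases hn : n ∈ ks
    · simp only [pvPick, if_pos hn, List.pairwise_cons]
      constructor
      · intro b hb
        have hmem := (pv_mem_pick rest (ks.erase n) (hnd.erase n)).mp hb
        have hbne : b ≠ n := fun h => (hnd.mem_erase_iff.mp hmem.1).1 (h ▸ rfl)
        have hbks : b ∈ ks := (hnd.mem_erase_iff.mp hmem.1).2
        rw [PySem.List.index?_cons_self]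
        rw [shift b hbks hbne hmem.2]
        simp
      · have tail := ih (ks.erase n) (hnd.erase n)
        refine tail.imp_of_mem ?_
        intro a b ha hb hab
        have hma := (pv_mem_pick rest (ks.erase n) (hnd.erase n)).mp ha
        have hmb := (pv_mem_pick rest (ks.erase n) (hnd.erase n)).mp hb
        rw [shift a (hnd.mem_erase_iff.mp hma.1).2 (fun h => (hnd.mem_erase_iff.mp hma.1).1 (h ▸ rfl)) hma.2,
            shift b (hnd.mem_erase_iff.mp hmb.1).2 (fun h => (hnd.mem_erase_iff.mp hmb.1).1 (h ▸ rfl)) hmb.2]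
        omega
    · simp only [pvPick, if_neg hn]
      refine (ih ks hnd).imp_of_mem ?_
      intro a b ha hb hab
      have hma := (pv_mem_pick rest ks hnd).mp ha
      have hmb := (pv_mem_pick rest ks hnd).mp hb
      rw [shift a hma.1 (fun h => hn (h ▸ hma.1)) hma.2,
          shift b hmb.1 (fun h => hn (h ▸ hmb.1)) hmb.2]
      omega

theorem pv_keys_erase {ν : Type} (d : PySem.Dict String ν) (k : String) :
    (d.erase k).keys = d.keys.filter (fun x => !(x == k)) := by
  simp [PySem.Dict.erase, PySem.Dict.keys, List.filter_map, Function.comp_def]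

theorem pv_keys_erase_of_nodup {ν : Type} (d : PySem.Dict String ν) (k : String)
    (hnd : d.keys.Nodup) : (d.erase k).keys = d.keys.erase k := by
  rw [pv_keys_erase, hnd.erase_eq_filter]
  apply List.filter_congr
  intro a _
  by_cases h : a = k <;> simp [h, bne]

theorem pv_get?_erase_of_ne {ν : Type} (d : PySem.Dict String ν) (k x : String) (h : x ≠ k) :
    (d.erase k).get? x = d.get? x := by
  show ((d.items.filter _).find? _).map _ = (d.items.find? _).map _
  congr 1
  induction d.items with
  | nil => rfl
  | cons p rest ih =>
    by_cases hk : p.1 = k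
    · simp [hk, Ne.symm h, ih]
    · by_cases hx : p.1 = x <;> simp [hk, hx, h, ih]

theorem pv_getD_erase_of_ne {ν : Type} (d : PySem.Dict String ν) (k x : String) (dflt : ν)
    (h : x ≠ k) : (d.erase k).getD x dflt = d.getD x dflt := by
  simp [PySem.Dict.getD, pv_get?_erase_of_ne d k x h]

theorem pv_items_foldl_erase {ν : Type} (ns : List String) (d : PySem.Dict String ν) :
    (ns.foldl (fun d n => d.erase n) d).items = d.items.filter (fun p => !(ns.contains p.1)) := by
  induction ns generalizing d with
  | nil => simp
  | cons n rest ih =>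
    rw [List.foldl_cons, ih]
    show (d.items.filter _).filter _ = _
    rw [List.filter_filter]
    apply List.filter_congr
    intro p _
    by_cases hpn : p.1 = n <;> simp [hpn, Bool.and_comm]

theorem pv_phase2 (order : List String) (d : PySem.Dict String (List (List (String × String))))
    (hnd : d.keys.Nodup) (out : List (String × List (List (String × String)))) :
    order.foldl
      (fun (acc : List (String × (List (List (String × String)))) × PySem.Dict String (List (List (String × String)))) name =>
        if acc.2.contains name then (acc.1 ++ [(name, acc.2.getD name [])], acc.2.erase name) else acc)
      (out, d)
    = (out ++ (pvPick order d.keys).map (fun n => (n, d.getD n [])),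
       (pvPick order d.keys).foldl (fun d n => d.erase n) d) := by
  induction order generalizing d out with
  | nil => simp [pvPick]
  | cons n rest ih =>
    rw [List.foldl_cons]
    by_cases hn : n ∈ d.keys
    · have hc : d.contains n = true := (PySem.Dict.contains_iff_mem_keys d n).mpr hn
      have hnd' : (d.erase n).keys.Nodup := by
        rw [pv_keys_erase_of_nodup d n hnd]; exact hnd.erase n
      simp only [hc, if_pos]
      rw [ih (d.erase n) hnd' (out ++ [(n, d.getD n [])])]
      simp only [pvPick, if_pos hn, pv_keys_erase_of_nodup d n hnd]
      simp only [Prod.mk.injEq]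
      constructor
      · rw [List.append_assoc]
        congr 1
        rw [List.map_cons, List.singleton_append]
        congr 1
        apply List.map_congr_left
        intro a ha
        have hmem := (pv_mem_pick rest (d.keys.erase n) (hnd.erase n)).mp ha
        have : a ≠ n := fun h => (hnd.mem_erase_iff.mp hmem.1).1 (h ▸ rfl)
        rw [pv_getD_erase_of_ne d n a [] this]
      · rfl
    · have hc : d.contains n = false := by
        rw [← Bool.not_eq_true]
        exact fun h => hn ((PySem.Dict.contains_iff_mem_keys d n).mp h)
      simp only [hc, Bool.false_eq_true, if_neg, not_false_iff]
      rw [ih d hnd out]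
      simp [pvPick, if_neg hn]

theorem pv_m_getD (items : List (List (String × String))) (c : String) :
    (items.foldl (fun d item => d.modify (pvCat item) [] (fun v => v ++ [item])) PySem.Dict.empty).getD c []
      = items.filter (fun it => pvCat it == c) := by
  have h := PySem.Dict.getD_foldl_modify_append
      (items.map (fun it => (pvCat it, it))) (PySem.Dict.empty (κ := String)) c
  rw [List.foldl_map] at h
  rw [h]
  simp [List.filter_map, Function.comp_def]

theorem pv_m_keys (items : List (List (String × String))) :
    (items.foldl (fun d item => d.modify (pvCat item) [] (fun v => v ++ [item])) PySem.Dict.empty).keys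
      = PySem.Set.ofList (items.map pvCat) := by
  have h := PySem.Dict.keys_foldl_modify_key items pvCat ([] : List (List (String × String)))
      (fun _ item v => v ++ [item]) PySem.Dict.empty
  simpa [PySem.Set.update_nil_left] using h

-- ===== VERDICT (by name: the statement is the Claim_ definition above) =====
theorem group_ai_by_category_spec : Claim_equal_group_ai_by_category := by
  intro items order _
  show group_ai_by_category items order = group_ai_by_category_alt items order
  unfold group_ai_by_category group_ai_by_category_alt
  simp only [PySem.List.dedup_eq_ofList]
  set m := items.foldl (fun d item => d.modify (pvCat item) [] (fun v => v ++ [item])) PySem.Dict.empty with hm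
  set names := PySem.Set.ofList (items.map pvCat) with hnames
  have hkeys : m.keys = names := pv_m_keys items
  have hndn : names.Nodup := PySem.Set.nodup_ofList _
  have hnd : m.keys.Nodup := by rw [hkeys]; exact hndn
  have he : (fun n => (n, m.getD n [])) =
      (fun n => (n, items.filter (fun item => pvCat item == n))) := by
    funext n; rw [pv_m_getD]
  rw [pv_phase2 order m hnd []]
  simp only [List.nil_append]
  set picks := pvPick order m.keys with hpicks
  -- B's first sorted call produces exactly the popped names, in pop order
  have hranked : PySem.List.sorted (names.filter (fun n => order.contains n))
      (fun n => (PySem.List.index? order n).getD 0) = picks := by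
    apply PySem.List.sorted_eq_of_perm_of_pairwise_lt
    · rw [List.perm_ext_iff_of_nodup (pv_nodup_pick order m.keys hnd) (hndn.filter _)]
      intro a
      rw [pv_mem_pick order m.keys hnd, List.mem_filter, hkeys]
      simp [and_comm]
    · rw [hpicks]; exact pv_pick_pairwise order m.keys hnd
  -- A's trailing sorted(m.items()) equals B's second sorted call, mapped to entries
  have hfilter_items : (picks.foldl (fun d n => d.erase n) m).items
      = (names.filter (fun n => !(order.contains n))).map (fun n => (n, m.getD n [])) := by
    rw [pv_items_foldl_erase, PySem.Dict.items_eq_map_keys m hnd [], hkeys, List.filter_map]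
    congr 1
    apply List.filter_congr
    intro k hk
    by_cases ho : k ∈ order
    · have : k ∈ picks := by
        rw [hpicks, pv_mem_pick order m.keys hnd, hkeys]; exact ⟨hk, ho⟩
      simp [this, ho]
    · have : k ∉ picks := by
        rw [hpicks, pv_mem_pick order m.keys hnd]; exact fun h => ho h.2
      simp [this, ho]
  have hrestnd : (names.filter (fun n => !(order.contains n))).Nodup := hndn.filter _
  have hrestsortnd : (PySem.List.sorted (names.filter (fun n => !(order.contains n)))
      (fun n => n)).Nodup :=
    ((PySem.List.sorted_perm (names.filter (fun n => !(order.contains n))) (fun n => n) false).symm.nodup hrestnd)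
  have hrest : PySem.List.sorted ((picks.foldl (fun d n => d.erase n) m).items) (fun p => p.1)
      = (PySem.List.sorted (names.filter (fun n => !(order.contains n))) (fun n => n)).map
          (fun n => (n, m.getD n [])) := by
    rw [hfilter_items]
    apply PySem.List.sorted_eq_of_perm_of_pairwise_lt
    · exact (PySem.List.sorted_perm _ _ _).map _
    · rw [List.pairwise_map]
      have hle := PySem.List.sorted_pairwise (names.filter (fun n => !(order.contains n)))
          (fun n => n)
      have hne : (PySem.List.sorted (names.filter (fun n => !(order.contains n)))
          (fun n => n)).Pairwise (· ≠ ·) := hrestsortnd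
      exact (hle.and hne).imp (fun h => lt_of_le_of_ne h.1 h.2)
  rw [hranked, hrest, List.map_append, he]
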